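-- pv_equiv track=rewrite | github.com/laslk/CCRR | script/consensus_cn.py | get_breakpoint_regions
-- ===== SOURCE A (Python) =====
-- def get_breakpoint_regions(bp_dict, t, limit):
--     regions_dict = {}
--
--     for method, method_bps in bp_dict.items():
--         chrom_region = {}
--
--         for chrom, bps in method_bps.items():
--             if not bps:
--                 continue
--
--             def calculate_region(bps, i):
--                 left_limit = round((bps[i - 1] + bps[i]) / 2) if i > 0 else 1
--                 right_limit = round((bps[i] + bps[i + 1]) / 2) if i < len(bps) - 1 else limit[chrom]
--
--                 return [max(bps[i] - t, left_limit), min(bps[i] + t, right_limit)]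
--
--             regions = [calculate_region(bps, i) for i in range(len(bps))]
--             chrom_region[chrom] = regions
--
--         regions_dict[method] = chrom_region
--
--     return regions_dict
-- ===== SOURCE B (Python) =====
-- def get_breakpoint_regions(bp_dict, t, limit):
--     regions_dict = {}
--     for method, method_bps in bp_dict.items():
--         chrom_region = {}
--         for chrom, bps in method_bps.items():
--             if not bps:
--                 continue
--             # single stateful pass: walk consecutive pairs carrying the previous
--             # cut point as the running left boundary; no indexing, each midpoint
--             # is computed exactly once.
--             regions = []
--             left = 1
--             it = iter(bps)
--             b = next(it)
--             for nxt in it: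
--                 cut = round((b + nxt) / 2)
--                 regions.append([max(b - t, left), min(b + t, cut)])
--                 left = cut
--                 b = nxt
--             regions.append([max(b - t, left), min(b + t, limit[chrom])])
--             chrom_region[chrom] = regions
--         regions_dict[method] = chrom_region
--     return regions_dict
-- ===== Notes on version B (the rewrite author's own statement) =====
-- stated objective: alternative
-- what changed: Replaces A's per-index closure that random-accesses bps[i-1], bps[i], bps[i+1] and recomputes each midpoint twice with a single stateful sequential pass over consecutive pairs that carries the previous cut point as the running left boundary, computing each midpoint once and never indexing.
import Mathlib
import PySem

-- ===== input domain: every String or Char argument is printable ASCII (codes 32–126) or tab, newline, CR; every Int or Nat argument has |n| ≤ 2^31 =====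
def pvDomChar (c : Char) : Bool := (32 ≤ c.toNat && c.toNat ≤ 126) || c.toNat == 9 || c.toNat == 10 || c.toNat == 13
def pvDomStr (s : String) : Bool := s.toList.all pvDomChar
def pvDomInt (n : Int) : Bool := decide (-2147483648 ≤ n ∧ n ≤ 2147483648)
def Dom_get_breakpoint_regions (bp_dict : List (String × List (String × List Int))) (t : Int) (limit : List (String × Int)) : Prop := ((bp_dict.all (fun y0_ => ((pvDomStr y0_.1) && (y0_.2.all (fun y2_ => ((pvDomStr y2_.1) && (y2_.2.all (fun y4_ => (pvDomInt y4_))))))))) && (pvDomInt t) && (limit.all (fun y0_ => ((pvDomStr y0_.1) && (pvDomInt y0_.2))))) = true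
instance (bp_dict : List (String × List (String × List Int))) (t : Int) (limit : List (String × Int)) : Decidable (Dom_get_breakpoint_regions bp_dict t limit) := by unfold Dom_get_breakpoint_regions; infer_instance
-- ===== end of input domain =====

-- B replaces A's per-index closure (random access to bps[i-1], bps[i], bps[i+1], each
-- midpoint computed twice) by one stateful sequential pass over consecutive pairs that
-- carries the previous cut point as the running left boundary; objective: alternative,
-- same asymptotic cost.

-- round((a+b)/2) for Python ints a,b with |a+b| ≤ 2^32: the quotient is exactly
-- representable as a float, so Python's banker's rounding of the half case is exact here.
def pvRound2 (s : Int) : Int :=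
  let k := PySem.Int.floordiv s 2
  if PySem.Int.mod s 2 = 0 then k else if PySem.Int.mod k 2 = 0 then k else k + 1

-- limit[chrom]; Pre_ guarantees the key is present (Python raises KeyError otherwise).
def pvLimGet (limit : List (String × Int)) (c : String) : Int := (limit.lookup c).getD 0

-- ===== PORT A =====
-- calculate_region(bps, i); indices i-1, i, i+1 are always in range for i ∈ range(len(bps)),
-- so the .getD 0 after pyGet? is never taken.
def pvCalcRegion (bps : List Int) (i : Nat) (t : Int) (lim : Int) : List Int :=
  let left := if (i : Int) > 0 then
      pvRound2 (((PySem.List.pyGet? bps ((i : Int) - 1)).getD 0) + ((PySem.List.pyGet? bps (i : Int)).getD 0))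
    else 1
  let right := if (i : Int) < (bps.length : Int) - 1 then
      pvRound2 (((PySem.List.pyGet? bps (i : Int)).getD 0) + ((PySem.List.pyGet? bps ((i : Int) + 1)).getD 0))
    else lim
  [max ((PySem.List.pyGet? bps (i : Int)).getD 0 - t) left,
   min ((PySem.List.pyGet? bps (i : Int)).getD 0 + t) right]

def get_breakpoint_regions (bp_dict : List (String × List (String × List Int))) (t : Int) (limit : List (String × Int)) : List (String × List (String × List (List Int))) :=
  bp_dict.map (fun m =>
    (m.1, m.2.foldl (fun acc p =>
        if p.2 = [] then acc
        else acc ++ [(p.1, (List.range p.2.length).map (fun i => pvCalcRegion p.2 i t (pvLimGet limit p.1)))]) []))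

-- ===== PORT B =====
-- Source B's stateful pair loop, transcribed as structural recursion on the breakpoint list:
-- `left` is the running left boundary (the previous cut), the final element is closed
-- with limit[chrom].  ([] is unreachable behind the `if not bps` guard.)
def pvRegRec (t lim : Int) : Int → List Int → List (List Int)
  | _, [] => []
  | left, [b] => [[max (b - t) left, min (b + t) lim]]
  | left, b :: nxt :: rest =>
      [max (b - t) left, min (b + t) (pvRound2 (b + nxt))] ::
        pvRegRec t lim (pvRound2 (b + nxt)) (nxt :: rest)

def get_breakpoint_regions_alt (bp_dict : List (String × List (String × List Int))) (t : Int) (limit : List (String × Int)) : List (String × List (String × List (List Int))) :=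
  bp_dict.map (fun m =>
    (m.1, m.2.foldl (fun acc p =>
        if p.2 = [] then acc
        else acc ++ [(p.1, pvRegRec t (pvLimGet limit p.1) 1 p.2)]) []))

-- ===== PRECONDITION & SPEC =====
-- Pre_ excludes exactly the inputs on which Python A raises KeyError: some method has a
-- chromosome with a nonempty breakpoint list whose name is missing from limit.
def Pre_get_breakpoint_regions (bp_dict : List (String × List (String × List Int))) (t : Int) (limit : List (String × Int)) : Prop :=
  ∀ p ∈ bp_dict, ∀ q ∈ p.2, q.2 ≠ [] → (limit.lookup q.1).isSome = true
instance (bp_dict : List (String × List (String × List Int))) (t : Int) (limit : List (String × Int)) : Decidable (Pre_get_breakpoint_regions bp_dict t limit) := by unfold Pre_get_breakpoint_regions; infer_instance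

def pvWitness_get_breakpoint_regions : (List (String × List (String × List Int))) × Int × (List (String × Int)) :=
  ([("m1", [("c1", [5, 10, 11]), ("c2", [])])], 2, [("c1", 100), ("c2", 50)])

def Spec_get_breakpoint_regions (bp_dict : List (String × List (String × List Int))) (t : Int) (limit : List (String × Int)) (out : List (String × List (String × List (List Int)))) : Prop := out = get_breakpoint_regions_alt bp_dict t limit
instance (bp_dict : List (String × List (String × List Int))) (t : Int) (limit : List (String × Int)) (out : List (String × List (String × List (List Int)))) : Decidable (Spec_get_breakpoint_regions bp_dict t limit out) := by unfold Spec_get_breakpoint_regions; infer_instance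

-- ===== CLAIM (what is proved, stated in full; the proofs are below) =====
def Claim_equal_get_breakpoint_regions : Prop := ∀ (bp_dict : List (String × List (String × List Int))) (t : Int) (limit : List (String × Int)), Dom_get_breakpoint_regions bp_dict t limit → Pre_get_breakpoint_regions bp_dict t limit → Spec_get_breakpoint_regions bp_dict t limit (get_breakpoint_regions bp_dict t limit)

-- ===== LEMMAS AND PROOFS =====

-- shifting the list by one shifts indices ≥ 2 (A's region at j+2 in b::bps only
-- looks at positions j+1, j+2, j+3, i.e. positions j, j+1, j+2 of bps)
theorem calcRegion_shift (b : Int) (bps : List Int) (j : Nat) (t lim : Int) :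
    pvCalcRegion (b :: bps) (j + 2) t lim = pvCalcRegion bps (j + 1) t lim := by
  unfold pvCalcRegion
  have h1 : ((j + 2 : Nat) : Int) - 1 = ((j + 1 : Nat) : Int) := by push_cast; ring
  have h2 : ((j + 2 : Nat) : Int) + 1 = ((j + 3 : Nat) : Int) := by push_cast; ring
  have h3 : ((j + 1 : Nat) : Int) - 1 = ((j : Nat) : Int) := by push_cast; ring
  have h4 : ((j + 1 : Nat) : Int) + 1 = ((j + 2 : Nat) : Int) := by push_cast; ring
  rw [h1, h2, h3, h4]
  simp only [PySem.List.pyGet?_natCast, List.getElem?_cons_succ, List.length_cons]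
  split_ifs <;> first | rfl | (exfalso; omega)

theorem regRec_gen (t lim : Int) : ∀ (rest : List Int) (nxt b : Int),
    pvRegRec t lim (pvRound2 (b + nxt)) (nxt :: rest)
      = (List.range (rest.length + 1)).map (fun i => pvCalcRegion (b :: nxt :: rest) (i + 1) t lim) := by
  intro rest
  induction rest with
  | nil =>
      intro nxt b
      simp [pvRegRec, pvCalcRegion, PySem.List.pyGet?_natCast, List.range_succ]
  | cons c rs ih =>
      intro nxt b
      rw [List.length_cons, List.range_succ_eq_map, List.map_cons, List.map_map]
      show pvRegRec t lim (pvRound2 (b + nxt)) (nxt :: c :: rs) = _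
      rw [pvRegRec, ih c nxt]
      refine congrArg₂ (· :: ·) ?_ ?_
      · -- head: A's region at index 1 of b::nxt::c::rs
        show _ = pvCalcRegion (b :: nxt :: c :: rs) 1 t lim
        unfold pvCalcRegion
        have e1 : ((1 : Nat) : Int) - 1 = ((0 : Nat) : Int) := by norm_num
        have e2 : ((1 : Nat) : Int) + 1 = ((2 : Nat) : Int) := by norm_num
        rw [e1, e2]
        simp only [PySem.List.pyGet?_natCast, List.length_cons]
        norm_num
      · -- tail: shift indices down by one
        refine List.map_congr_left (fun i _ => ?_)
        exact (calcRegion_shift b (nxt :: c :: rs) i t lim).symm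

theorem regions_eq (bps : List Int) (t lim : Int) (h : bps ≠ []) :
    (List.range bps.length).map (fun i => pvCalcRegion bps i t lim) = pvRegRec t lim 1 bps := by
  match bps, h with
  | [b], _ =>
      simp [pvRegRec, pvCalcRegion, PySem.List.pyGet?_natCast, List.range_succ]
  | b :: nxt :: rest, _ =>
      rw [List.length_cons, List.length_cons, List.range_succ_eq_map, List.map_cons, List.map_map]
      rw [pvRegRec, regRec_gen t lim rest nxt b]
      refine congrArg₂ (· :: ·) ?_ ?_
      · -- index 0
        unfold pvCalcRegion
        simp only [List.length_cons, Nat.cast_zero]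
        norm_num
      · refine List.map_congr_left (fun i _ => ?_)
        rfl

-- ===== VERDICT (by name: the statement is the Claim_ definition above) =====
theorem get_breakpoint_regions_spec : Claim_equal_get_breakpoint_regions := by
  intro bp_dict t limit _ _
  unfold Spec_get_breakpoint_regions get_breakpoint_regions get_breakpoint_regions_alt
  refine List.map_congr_left (fun m _ => ?_)
  have hf : (fun (acc : List (String × List (List Int))) (p : String × List Int) =>
      if p.2 = [] then acc
      else acc ++ [(p.1, (List.range p.2.length).map (fun i => pvCalcRegion p.2 i t (pvLimGet limit p.1)))])
      = (fun acc p => if p.2 = [] then acc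
      else acc ++ [(p.1, pvRegRec t (pvLimGet limit p.1) 1 p.2)]) := by
    funext acc p
    by_cases h : p.2 = []
    · simp [h]
    · simp [h, regions_eq p.2 t (pvLimGet limit p.1) h]
  rw [hf]
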